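-- pv_equiv track=rewrite | github.com/GilmarRDS/API | regras_alocacao.py | verificar_janelas
-- ===== SOURCE A (Python) =====
-- def verificar_janelas(ocupacao_professor: dict, novo_slot: int, escola: str, rotas: dict) -> tuple[bool, int]:
--     """
--     Verifica se adicionar uma aula em um slot criaria janelas/buracos.
--
--     REGRA: Não pode ter janelas/buracos entre aulas na mesma escola ou rota.
--     PERMITE: Alocações que PREENCHEM buracos existentes.
--
--     Args:
--         ocupacao_professor: Dicionário {slot: escola} das aulas já alocadas
--         novo_slot: Slot onde quer adicionar a aula (0-4)
--         escola: Escola onde será a aula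
--         rotas: Dicionário de rotas (escolas que podem ser visitadas no mesmo dia)
--
--     Returns:
--         tuple: (cria_janela: bool, bonus_preenchimento: int)
--         - cria_janela: True se criar janela (NÃO PERMITIR), False se não criar (PERMITIR)
--         - bonus_preenchimento: Bonus positivo se preencher um buraco existente (para priorizar)
--     """
--     if not ocupacao_professor:
--         return False, 0  # Primeira aula, não há janela - PERMITIR
--
--     # Verificar se há aulas na mesma escola
--     aulas_mesma_escola = [s for s, e in ocupacao_professor.items() if e == escola]
--
--     if aulas_mesma_escola:
--         # Se há aulas na mesma escola, verificar se o novo slot é consecutivo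
--         slots_escola = sorted(aulas_mesma_escola + [novo_slot])
--
--         # Verificar se preenche um buraco existente
--         bonus_preenchimento = 0
--         for i in range(len(slots_escola) - 1):
--             gap = slots_escola[i+1] - slots_escola[i]
--             if gap > 1:
--                 # Há um buraco existente
--                 if novo_slot > slots_escola[i] and novo_slot < slots_escola[i+1]:
--                     # O novo slot PREENCHE o buraco - PERMITIR e dar bonus
--                     bonus_preenchimento = 1000  # Grande bonus por preencher buraco
--                     return False, bonus_preenchimento
--                 else:
--                     # O novo slot CRIA um novo buraco - NÃO PERMITIR
--                     return True, 0
--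
--         # Não há buracos - PERMITIR
--         return False, 0
--
--     # Verificar rotas (escolas que podem ser visitadas no mesmo dia)
--     escolas_rota = rotas.get(escola, set())
--     aulas_na_rota = []
--
--     for s_ocup, e_ocup in ocupacao_professor.items():
--         # Verificar se está na mesma rota
--         if e_ocup == escola or e_ocup in escolas_rota or escola in rotas.get(e_ocup, set()):
--             aulas_na_rota.append(s_ocup)
--
--     if aulas_na_rota:
--         # Se há aulas na rota, verificar se o novo slot é consecutivo
--         slots_rota = sorted(aulas_na_rota + [novo_slot])
--
--         # Verificar se preenche um buraco existente
--         for i in range(len(slots_rota) - 1):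
--             gap = slots_rota[i+1] - slots_rota[i]
--             if gap > 1:
--                 # Há um buraco existente
--                 if novo_slot > slots_rota[i] and novo_slot < slots_rota[i+1]:
--                     # O novo slot PREENCHE o buraco - PERMITIR e dar bonus
--                     return False, 1000  # Grande bonus por preencher buraco
--                 else:
--                     # O novo slot CRIA um novo buraco - NÃO PERMITIR
--                     return True, 0
--
--         # Não há buracos - PERMITIR
--         return False, 0
--
--     # Se é escola diferente e não está na rota, não há problema de janela
--     # (professor pode ter aulas em escolas diferentes sem problema)
--     return False, 0  # PERMITIR
-- ===== SOURCE B (Python) =====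
-- def verificar_janelas(ocupacao_professor: dict, novo_slot: int, escola: str, rotas: dict) -> tuple[bool, int]:
--     if not ocupacao_professor:
--         return False, 0
--     slots = [s for s, e in ocupacao_professor.items() if e == escola]
--     if not slots:
--         rota_escola = rotas.get(escola, ())
--         slots = [s for s, e in ocupacao_professor.items()
--                  if e == escola or e in rota_escola or escola in rotas.get(e, ())]
--         if not slots:
--             return False, 0
--     todos = set(slots)
--     todos.add(novo_slot)
--     return max(todos) - min(todos) + 1 != len(todos), 0
-- ===== Notes on version B (the rewrite author's own statement) =====
-- stated objective: simpler
-- what changed: The sort-then-scan-adjacent-pairs-for-the-first-gap loop (with a dead bonus=1000 branch that can never fire, since novo_slot is in the sorted list) is replaced by an arithmetic contiguity test: dedup the slots plus novo_slot into a set and check max - min + 1 != len(set); the bonus is therefore always 0.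
import Mathlib
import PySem

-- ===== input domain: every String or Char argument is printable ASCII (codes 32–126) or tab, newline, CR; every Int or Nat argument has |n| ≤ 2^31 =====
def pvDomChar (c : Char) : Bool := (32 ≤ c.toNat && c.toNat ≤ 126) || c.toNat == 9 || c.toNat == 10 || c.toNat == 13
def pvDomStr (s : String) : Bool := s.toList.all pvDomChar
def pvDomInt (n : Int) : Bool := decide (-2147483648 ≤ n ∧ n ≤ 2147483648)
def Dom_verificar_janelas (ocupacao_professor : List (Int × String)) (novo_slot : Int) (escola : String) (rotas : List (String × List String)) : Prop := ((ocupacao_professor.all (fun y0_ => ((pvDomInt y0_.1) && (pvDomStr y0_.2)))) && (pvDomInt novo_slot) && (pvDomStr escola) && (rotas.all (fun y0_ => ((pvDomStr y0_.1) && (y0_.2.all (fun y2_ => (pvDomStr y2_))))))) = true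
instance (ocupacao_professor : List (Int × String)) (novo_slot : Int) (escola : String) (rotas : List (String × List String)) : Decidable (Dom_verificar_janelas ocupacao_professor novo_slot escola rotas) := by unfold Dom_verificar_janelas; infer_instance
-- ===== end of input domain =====

-- B replaces A's sort-and-scan-for-first-gap (whose bonus=1000 branch is unreachable) by an
-- arithmetic contiguity test max-min+1 ≠ |set| on the deduplicated slot set; objective: simpler.

-- ===== PORT A =====
-- A's 'for i in range(len(slots)-1)' gap scan with its two early returns, as recursion on adjacent pairs
def pvScanA (slots : List Int) (novo : Int) : Bool × Int :=
  match slots with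
  | a :: b :: rest =>
      if b - a > 1 then
        if novo > a ∧ novo < b then (false, 1000) else (true, 0)
      else pvScanA (b :: rest) novo
  | _ => (false, 0)

def verificar_janelas (ocupacao_professor : List (Int × String)) (novo_slot : Int) (escola : String) (rotas : List (String × List String)) : Bool × Int :=
  if ocupacao_professor = [] then (false, 0)
  else
    -- [s for s, e in ocupacao_professor.items() if e == escola]
    let aulas_mesma_escola := (ocupacao_professor.filter (fun p => p.2 == escola)).map (fun p => p.1)
    if aulas_mesma_escola ≠ [] then
      let slots_escola := PySem.List.sorted (aulas_mesma_escola ++ [novo_slot]) (fun x => x) false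
      pvScanA slots_escola novo_slot
    else
      let escolas_rota := PySem.Dict.getD ⟨rotas⟩ escola []
      -- explicit for-loop building aulas_na_rota by append
      let aulas_na_rota := ocupacao_professor.foldl (fun acc p =>
        if p.2 == escola || escolas_rota.contains p.2 || (PySem.Dict.getD ⟨rotas⟩ p.2 []).contains escola
        then acc ++ [p.1] else acc) []
      if aulas_na_rota ≠ [] then
        let slots_rota := PySem.List.sorted (aulas_na_rota ++ [novo_slot]) (fun x => x) false
        pvScanA slots_rota novo_slot
      else (false, 0)

-- ===== PORT B =====
-- todos = set(slots); todos.add(novo); max(todos) - min(todos) + 1 != len(todos)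
def pvContigB (slots : List Int) (novo : Int) : Bool :=
  let todos : PySem.Set Int := PySem.Set.add (PySem.Set.ofList slots) novo
  match PySem.List.max? todos (fun x => x), PySem.List.min? todos (fun x => x) with
  | some mx, some mn => decide (mx - mn + 1 ≠ (todos.length : Int))
  | _, _ => false

def verificar_janelas_alt (ocupacao_professor : List (Int × String)) (novo_slot : Int) (escola : String) (rotas : List (String × List String)) : Bool × Int :=
  if ocupacao_professor = [] then (false, 0)
  else
    let slots := (ocupacao_professor.filter (fun p => p.2 == escola)).map (fun p => p.1)
    if slots ≠ [] then (pvContigB slots novo_slot, 0)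
    else
      let rota_escola := PySem.Dict.getD ⟨rotas⟩ escola []
      let slots2 := (ocupacao_professor.filter (fun p =>
        p.2 == escola || rota_escola.contains p.2 || (PySem.Dict.getD ⟨rotas⟩ p.2 []).contains escola)).map (fun p => p.1)
      if slots2 ≠ [] then (pvContigB slots2 novo_slot, 0)
      else (false, 0)

-- ===== PRECONDITION & SPEC =====
def Spec_verificar_janelas (ocupacao_professor : List (Int × String)) (novo_slot : Int) (escola : String) (rotas : List (String × List String)) (out : Bool × Int) : Prop := out = verificar_janelas_alt ocupacao_professor novo_slot escola rotas
instance (ocupacao_professor : List (Int × String)) (novo_slot : Int) (escola : String) (rotas : List (String × List String)) (out : Bool × Int) : Decidable (Spec_verificar_janelas ocupacao_professor novo_slot escola rotas out) := by unfold Spec_verificar_janelas; infer_instance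

-- ===== CLAIM (what is proved, stated in full; the proofs are below) =====
def Claim_equal_verificar_janelas : Prop := ∀ (ocupacao_professor : List (Int × String)) (novo_slot : Int) (escola : String) (rotas : List (String × List String)), Dom_verificar_janelas ocupacao_professor novo_slot escola rotas → Spec_verificar_janelas ocupacao_professor novo_slot escola rotas (verificar_janelas ocupacao_professor novo_slot escola rotas)

-- ===== LEMMAS AND PROOFS =====

-- A's gap scan with the dead bonus branch removed: 'is there an adjacent gap > 1'
def pvGapB : List Int → Bool
  | a :: b :: rest => decide (b - a > 1) || pvGapB (b :: rest)
  | _ => false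

-- on a nondecreasing list that contains novo (or whose head bounds it below),
-- the bonus=1000 branch of A's scan never fires
lemma pvScanA_eq_gapB (L : List Int) (novo : Int)
    (hs : L.Pairwise (· ≤ ·))
    (h : (∃ a t, L = a :: t ∧ novo ≤ a) ∨ novo ∈ L) :
    pvScanA L novo = (pvGapB L, 0) := by
  induction L with
  | nil => simp [pvScanA, pvGapB]
  | cons a t ih =>
    cases t with
    | nil => simp [pvScanA, pvGapB]
    | cons b r =>
      rw [List.pairwise_cons] at hs
      obtain ⟨ha, hs'⟩ := hs
      have hab : a ≤ b := ha b (by simp)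
      have hbr : ∀ x ∈ r, b ≤ x := (List.pairwise_cons.mp hs').1
      have hna : novo ≤ a ∨ novo ∈ a :: b :: r := by
        rcases h with ⟨x, t', hx, hle⟩ | hm
        · cases hx; exact Or.inl hle
        · exact Or.inr hm
      by_cases hgap : b - a > 1
      · have hnb : ¬(novo > a ∧ novo < b) := by
          rintro ⟨h1, h2⟩
          rcases hna with hle | hm
          · omega
          · rcases List.mem_cons.mp hm with rfl | hm'
            · omega
            · rcases List.mem_cons.mp hm' with rfl | hm''
              · omega
              · have := hbr novo hm''; omega
        simp [pvScanA, pvGapB, hgap, hnb]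
      · have hnew : (∃ a' t', b :: r = a' :: t' ∧ novo ≤ a') ∨ novo ∈ b :: r := by
          rcases hna with hle | hm
          · exact Or.inl ⟨b, r, rfl, le_trans hle hab⟩
          · rcases List.mem_cons.mp hm with rfl | hm'
            · exact Or.inl ⟨b, r, rfl, hab⟩
            · exact Or.inr hm'
        have := ih hs' hnew
        simp only [pvScanA, pvGapB, if_neg hgap, this]
        simp [hgap]

-- distinct count of a nondecreasing list is at most its span + 1
lemma pvCard_le_span (L : List Int) : ∀ (a : Int), (a :: L).Pairwise (· ≤ ·) →
    (((a :: L).toFinset.card : Int)) ≤ L.foldl max a - a + 1 := by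
  induction L with
  | nil => intro a _; simp
  | cons b r ih =>
    intro a hs
    rw [List.pairwise_cons] at hs
    obtain ⟨ha, hs'⟩ := hs
    have hab : a ≤ b := ha b (by simp)
    have hbr : ∀ x ∈ r, b ≤ x := (List.pairwise_cons.mp hs').1
    have hfold : (b :: r).foldl max a = r.foldl max b := by
      simp [List.foldl, max_eq_right hab]
    have ihb := ih b hs'
    rw [hfold]
    by_cases hab' : a = b
    · subst hab'
      have : (a :: a :: r).toFinset = (a :: r).toFinset := by simp
      rw [this]; omega
    · have halt : a < b := lt_of_le_of_ne hab hab'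
      have hnm : a ∉ (b :: r).toFinset := by
        simp only [List.mem_toFinset, List.mem_cons]
        rintro (rfl | hm)
        · omega
        · have := hbr a hm; omega
      rw [List.toFinset_cons, Finset.card_insert_of_notMem hnm]
      push_cast
      omega

-- on a nondecreasing list: no adjacent gap > 1  ↔  span + 1 = number of distinct elements
lemma pvGapB_iff_span (L : List Int) : ∀ (a : Int), (a :: L).Pairwise (· ≤ ·) →
    ((pvGapB (a :: L) = false) ↔ L.foldl max a - a + 1 = ((a :: L).toFinset.card : Int)) := by
  induction L with
  | nil => intro a _; simp [pvGapB]
  | cons b r ih =>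
    intro a hs
    rw [List.pairwise_cons] at hs
    obtain ⟨ha, hs'⟩ := hs
    have hab : a ≤ b := ha b (by simp)
    have hbr : ∀ x ∈ r, b ≤ x := (List.pairwise_cons.mp hs').1
    have hfold : (b :: r).foldl max a = r.foldl max b := by
      simp [List.foldl, max_eq_right hab]
    have ihb := ih b hs'
    rw [hfold]
    by_cases hab' : a = b
    · subst hab'
      have hset : (a :: a :: r).toFinset = (a :: r).toFinset := by simp
      have hgap : pvGapB (a :: a :: r) = pvGapB (a :: r) := by
        simp [pvGapB]
      rw [hset, hgap]; exact ihb
    · have halt : a < b := lt_of_le_of_ne hab hab'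
      have hnm : a ∉ (b :: r).toFinset := by
        simp only [List.mem_toFinset, List.mem_cons]
        rintro (rfl | hm)
        · omega
        · have := hbr a hm; omega
      rw [List.toFinset_cons, Finset.card_insert_of_notMem hnm]
      have hcl := pvCard_le_span r b hs'
      by_cases hone : b - a = 1
      · have hgap : pvGapB (a :: b :: r) = pvGapB (b :: r) := by
          simp [pvGapB]; omega
        rw [hgap]
        rw [ihb]
        push_cast
        constructor <;> intro h <;> omega
      · have hbig : b - a > 1 := by omega
        have hgap : pvGapB (a :: b :: r) = true := by
          simp [pvGapB]; omega
        rw [hgap]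
        push_cast at hcl ⊢
        constructor
        · intro h; simp at h
        · intro h; exfalso; omega

-- the central bridge: A's scan of sorted(slots + [novo]) equals B's contiguity test
lemma pvBridge (slots : List Int) (novo : Int) :
    pvScanA (PySem.List.sorted (slots ++ [novo]) (fun x => x) false) novo
      = (pvContigB slots novo, 0) := by
  set L := PySem.List.sorted (slots ++ [novo]) (fun x => x) false with hL
  have hperm : L.Perm (slots ++ [novo]) := PySem.List.sorted_perm _ _ _
  have hpw : L.Pairwise (· ≤ ·) := by
    have := PySem.List.sorted_pairwise (xs := slots ++ [novo]) (key := fun x => x)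
    simpa using this
  have hnv : novo ∈ L := hperm.mem_iff.mpr (by simp)
  have hscan := pvScanA_eq_gapB L novo hpw (Or.inr hnv)
  -- todos
  set todos : PySem.Set Int := PySem.Set.add (PySem.Set.ofList slots) novo with htodos
  have hmem : ∀ x, x ∈ todos ↔ x ∈ L := by
    intro x
    rw [htodos, PySem.Set.mem_add, PySem.Set.mem_ofList, hperm.mem_iff]
    simp [or_comm]
  have hnodup : todos.Nodup := PySem.Set.nodup_add _ _ (PySem.Set.nodup_ofList slots)
  have hnvt : novo ∈ todos := (hmem novo).mpr hnv
  -- L is nonempty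
  obtain ⟨a, t, hLat⟩ : ∃ a t, L = a :: t := by
    cases hLe : L with
    | nil => rw [hLe] at hnv; simp at hnv
    | cons a t => exact ⟨a, t, rfl⟩
  -- min and max of todos
  cases hmax : PySem.List.max? todos (fun x => x) with
  | none =>
    rw [PySem.List.max?_eq_none_iff] at hmax
    rw [hmax] at hnvt; simp at hnvt
  | some mx =>
  cases hmin : PySem.List.min? todos (fun x => x) with
  | none =>
    rw [PySem.List.min?_eq_none_iff] at hmin
    rw [hmin] at hnvt; simp at hnvt
  | some mn =>
    have hmxmem : mx ∈ L := (hmem mx).mp (PySem.List.max?_mem hmax)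
    have hmnmem : mn ∈ L := (hmem mn).mp (PySem.List.min?_mem hmin)
    have hmxmax : ∀ y ∈ todos, y ≤ mx := by
      have := PySem.List.max?_isMax hmax; simpa using this
    have hmnmin : ∀ y ∈ todos, mn ≤ y := by
      have := PySem.List.min?_isMin hmin; simpa using this
    have haall : ∀ x ∈ t, a ≤ x := by
      rw [hLat] at hpw; exact (List.pairwise_cons.mp hpw).1
    -- mn = a
    have hmna : mn = a := by
      have h1 : mn ≤ a := hmnmin a ((hmem a).mpr (by rw [hLat]; simp))
      have h2 : a ≤ mn := by
        rw [hLat] at hmnmem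
        rcases List.mem_cons.mp hmnmem with rfl | hm
        · exact le_refl _
        · exact haall mn hm
      omega
    -- mx = t.foldl max a
    have hmaxL : PySem.List.max? L (fun x => x) = some (t.foldl max a) := by
      rw [hLat]; exact PySem.List.max?_id_cons _ _
    have hFmem : t.foldl max a ∈ L := PySem.List.max?_mem hmaxL
    have hFmax : ∀ y ∈ L, y ≤ t.foldl max a := by
      have := PySem.List.max?_isMax hmaxL; simpa using this
    have hmxF : mx = t.foldl max a := by
      have h1 : mx ≤ t.foldl max a := hFmax mx hmxmem
      have h2 : t.foldl max a ≤ mx := hmxmax _ ((hmem _).mpr hFmem)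
      omega
    -- lengths
    have hlen : todos.length = L.toFinset.card := by
      have h1 : todos.toFinset = L.toFinset := by
        ext x; simp only [List.mem_toFinset]; exact hmem x
      rw [← h1, List.toFinset_card_of_nodup hnodup]
    -- finish
    have hiff := pvGapB_iff_span t a (by rw [← hLat]; exact hpw)
    rw [← hLat] at hiff
    have hcontig : pvContigB slots novo = decide (t.foldl max a - a + 1 ≠ (L.toFinset.card : Int)) := by
      rw [pvContigB]
      simp only [← htodos, hmax, hmin, hmna, hmxF, hlen]
    rw [hscan, hcontig]
    by_cases he : t.foldl max a - a + 1 = (L.toFinset.card : Int)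
    · rw [hiff.mpr he]
      simp [he]
    · have : pvGapB L = true := by
        rcases Bool.eq_false_or_eq_true (pvGapB L) with h | h
        · exact h
        · exact absurd (hiff.mp h) he
      rw [this]; simp [he]

-- ===== VERDICT (by name: the statement is the Claim_ definition above) =====
theorem verificar_janelas_spec : Claim_equal_verificar_janelas := by
  intro occ novo escola rotas _
  unfold Spec_verificar_janelas verificar_janelas verificar_janelas_alt
  by_cases h0 : occ = []
  · simp [h0]
  · simp only [if_neg h0]
    by_cases h1 : (occ.filter (fun p => p.2 == escola)).map (fun p => p.1) ≠ []
    · simp only [if_pos h1]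
      exact pvBridge _ novo
    · simp only [if_neg h1]
      have hfold : occ.foldl (fun acc p =>
          if p.2 == escola || (PySem.Dict.getD ⟨rotas⟩ escola []).contains p.2 ||
             (PySem.Dict.getD ⟨rotas⟩ p.2 []).contains escola
          then acc ++ [p.1] else acc) [] =
          (occ.filter (fun p =>
            p.2 == escola || (PySem.Dict.getD ⟨rotas⟩ escola []).contains p.2 ||
            (PySem.Dict.getD ⟨rotas⟩ p.2 []).contains escola)).map (fun p => p.1) := by
        rw [PySem.List.foldl_append_if]
        simp
      rw [hfold]
      by_cases h2 : (occ.filter (fun p =>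
            p.2 == escola || (PySem.Dict.getD ⟨rotas⟩ escola []).contains p.2 ||
            (PySem.Dict.getD ⟨rotas⟩ p.2 []).contains escola)).map (fun p => p.1) ≠ []
      · simp only [if_pos h2]
        exact pvBridge _ novo
      · simp only [if_neg h2]
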